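-- pv_equiv track=rewrite | github.com/RafDevX/JogoDoMoinhoFP | jogo_do_moinho.py | obter_posicoes_adjacentes
-- ===== SOURCE A (Python) =====
-- def cria_posicao(c, l):
-- 	# str x str -> posicao
-- 	"""Constroi uma posicao.
--
-- 	Recebe como argumentos duas cadeias de caracteres correspondentes
-- 	a coluna e a linha de uma posicao e devolve a posicao correspondente.
-- 	Gera um ValueError caso algum dos argumentos seja invalido.
-- 	"""
-- 	if c in ('a', 'b', 'c') and l in ('1', '2', '3'):
-- 		return [c, l]
--
-- 	raise ValueError('cria_posicao: argumentos invalidos')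
--
-- def posicao_para_str(p):
-- 	# posicao -> str
-- 	"""Obtem a representacao em cadeia de caracteres de uma posicao.
--
-- 	Recebe uma posicao como argumento e devolve a cadeia de caracteres
-- 	que a representa, na forma 'cl' (sendo c a sua coluna e l a sua linha).
-- 	"""
-- 	return p[0] + p[1]
--
-- def obter_posicoes_adjacentes(p):
-- 	# posicao -> tuplo de posicoes
-- 	"""Obtem as posicoes adjacentes a uma posicao.
--
-- 	Recebe uma posicao como argumento e devolve um tuplo com todas as
-- 	posicoes adjacentes a esta, por ordem de leitura do tabuleiro.
-- 	"""
-- 	adj = {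
-- 		'a1': ('b1', 'a2', 'b2'),
-- 		'b1': ('a1', 'c1', 'b2'),
-- 		'c1': ('b1', 'b2', 'c2'),
-- 		'a2': ('a1', 'b2', 'a3'),
-- 		'b2': ('a1', 'b1', 'c1', 'a2', 'c2', 'a3', 'b3', 'c3'),
-- 		'c2': ('c1', 'b2', 'c3'),
-- 		'a3': ('a2', 'b2', 'b3'),
-- 		'b3': ('b2', 'a3', 'c3'),
-- 		'c3': ('b2', 'c2', 'b3'),
-- 	}
-- 	return tuple(cria_posicao(x[0], x[1]) for x in adj[posicao_para_str(p)])
-- ===== SOURCE B (Python) =====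
-- LINES = [['a1', 'b1', 'c1'], ['a2', 'b2', 'c2'], ['a3', 'b3', 'c3'],
--          ['a1', 'a2', 'a3'], ['b1', 'b2', 'b3'], ['c1', 'c2', 'c3'],
--          ['a1', 'b2', 'c3'], ['c1', 'b2', 'a3']]
--
-- def obter_posicoes_adjacentes(p):
-- 	key = p[0] + p[1]
-- 	neigh = set()
-- 	for line in LINES:
-- 		for i, q in enumerate(line):
-- 			if q == key:
-- 				if i > 0:
-- 					neigh.add(line[i - 1])
-- 				if i + 1 < len(line):
-- 					neigh.add(line[i + 1])
-- 	if not neigh: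
-- 		# key lies on no mill line, so it is not a board position
-- 		raise KeyError(key)
-- 	return tuple([s[0], s[1]]
-- 	             for s in sorted(neigh, key=lambda s: (s[1], s[0])))
-- ===== Notes on version B (the rewrite author's own statement) =====
-- stated objective: alternative
-- what changed: B derives each position's neighbours from the board's 8 mill lines (rows, columns, centre diagonals) collected into a set and sorted into reading order, instead of A's hand-written 9-entry adjacency dictionary.
import Mathlib
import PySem

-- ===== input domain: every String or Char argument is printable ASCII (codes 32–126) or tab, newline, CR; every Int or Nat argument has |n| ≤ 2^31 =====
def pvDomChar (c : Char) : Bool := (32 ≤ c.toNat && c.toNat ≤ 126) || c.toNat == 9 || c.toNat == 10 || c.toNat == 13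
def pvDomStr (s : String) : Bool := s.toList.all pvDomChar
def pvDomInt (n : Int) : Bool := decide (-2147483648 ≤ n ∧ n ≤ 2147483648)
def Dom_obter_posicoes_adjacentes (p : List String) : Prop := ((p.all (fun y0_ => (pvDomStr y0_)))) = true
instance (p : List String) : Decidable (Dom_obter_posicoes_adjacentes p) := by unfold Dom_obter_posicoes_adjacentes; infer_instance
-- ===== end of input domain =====

-- B replaces A's hand-written 9-entry adjacency table by deriving neighbours from the
-- board's 8 mill lines and sorting them into reading order (objective: alternative).
-- Return-value equivalence only; neither program mutates its argument.

-- ===== PORT A =====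
-- cria_posicao; none = ValueError
def pvCriaPosicao (c l : Char) : Option (List String) :=
  if (c = 'a' ∨ c = 'b' ∨ c = 'c') ∧ (l = '1' ∨ l = '2' ∨ l = '3') then
    some [String.ofList [c], String.ofList [l]]
  else none

def pvAdj : PySem.Dict String (List String) := PySem.Dict.ofList
  [("a1", ["b1", "a2", "b2"]),
   ("b1", ["a1", "c1", "b2"]),
   ("c1", ["b1", "b2", "c2"]),
   ("a2", ["a1", "b2", "a3"]),
   ("b2", ["a1", "b1", "c1", "a2", "c2", "a3", "b3", "c3"]),
   ("c2", ["c1", "b2", "c3"]),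
   ("a3", ["a2", "b2", "b3"]),
   ("b3", ["b2", "a3", "c3"]),
   ("c3", ["b2", "c2", "b3"])]

-- the body of A after the key p[0]+p[1] has been read
def pvACore (key : String) : List (List String) :=
  match PySem.Dict.get? pvAdj key with
  | some t => t.map (fun x =>
      -- x[0], x[1]: every table entry is a 2-char key, so the lookups and
      -- cria_posicao always succeed; the .getD defaults are never taken
      (pvCriaPosicao ((PySem.Str.pyGet? x 0).getD ' ') ((PySem.Str.pyGet? x 1).getD ' ')).getD [])
  | none => []      -- KeyError: excluded by Pre_

def obter_posicoes_adjacentes (p : List String) : List (List String) :=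
  match PySem.List.pyGet? p 0, PySem.List.pyGet? p 1 with
  | some a, some b => pvACore (a ++ b)        -- posicao_para_str p = p[0] + p[1]
  | _, _ => []      -- IndexError: excluded by Pre_

-- ===== PORT B =====
def pvLines : List (List String) :=
  [["a1", "b1", "c1"], ["a2", "b2", "c2"], ["a3", "b3", "c3"],
   ["a1", "a2", "a3"], ["b1", "b2", "b3"], ["c1", "c2", "c3"],
   ["a1", "b2", "c3"], ["c1", "b2", "a3"]]

-- the body of B after the key p[0]+p[1] has been read
def pvBCore (key : String) : List (List String) :=
  let neigh : PySem.Set String :=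
    pvLines.foldl (fun acc line =>
      (PySem.List.enumerate line 0).foldl (fun acc iq =>
        if iq.2 = key then
          let acc := if iq.1 > 0 then PySem.Set.add acc ((PySem.List.pyGet? line (iq.1 - 1)).getD "") else acc
          if iq.1 + 1 < (line.length : Int) then PySem.Set.add acc ((PySem.List.pyGet? line (iq.1 + 1)).getD "") else acc
        else acc) acc) PySem.Set.empty
  if neigh.isEmpty then []   -- KeyError: excluded by Pre_
  else (PySem.List.sorted2 neigh
      (fun s => (PySem.Str.pyGet? s 1).getD ' ') (fun s => (PySem.Str.pyGet? s 0).getD ' ')).map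
    (fun s => [String.ofList [(PySem.Str.pyGet? s 0).getD ' '], String.ofList [(PySem.Str.pyGet? s 1).getD ' ']])

def obter_posicoes_adjacentes_alt (p : List String) : List (List String) :=
  -- key = p[0] + p[1]; [] stands for the IndexError, excluded by Pre_ as in A
  (((PySem.List.pyGet? p 0).bind fun a =>
    (PySem.List.pyGet? p 1).map fun b => pvBCore (a ++ b)).getD [])

-- ===== PRECONDITION & SPEC =====
-- Pre_ excludes exactly the inputs where Python A raises: lists with fewer than two
-- elements (IndexError in p[0]/p[1]) and keys p[0]+p[1] outside the nine board positions (KeyError).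
def Pre_obter_posicoes_adjacentes (p : List String) : Prop :=
  2 ≤ p.length ∧
    (p.getD 0 "" ++ p.getD 1 "") ∈ ["a1", "b1", "c1", "a2", "b2", "c2", "a3", "b3", "c3"]
instance (p : List String) : Decidable (Pre_obter_posicoes_adjacentes p) := by
  unfold Pre_obter_posicoes_adjacentes; infer_instance

def pvWitness_obter_posicoes_adjacentes : List String := ["b", "2"]

def Spec_obter_posicoes_adjacentes (p : List String) (out : List (List String)) : Prop := out = obter_posicoes_adjacentes_alt p
instance (p : List String) (out : List (List String)) : Decidable (Spec_obter_posicoes_adjacentes p out) := by unfold Spec_obter_posicoes_adjacentes; infer_instance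

-- ===== CLAIM (what is proved, stated in full; the proofs are below) =====
def Claim_equal_obter_posicoes_adjacentes : Prop := ∀ (p : List String), Dom_obter_posicoes_adjacentes p → Pre_obter_posicoes_adjacentes p → Spec_obter_posicoes_adjacentes p (obter_posicoes_adjacentes p)

-- ===== LEMMAS AND PROOFS =====
-- on each of the nine valid keys the two cores agree (a finite check)
theorem pvCore_eq : ∀ k ∈ ["a1", "b1", "c1", "a2", "b2", "c2", "a3", "b3", "c3"], pvACore k = pvBCore k := by
  decide

-- ===== VERDICT (by name: the statement is the Claim_ definition above) =====
theorem obter_posicoes_adjacentes_spec : Claim_equal_obter_posicoes_adjacentes := by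
  intro p _ hpre
  unfold Spec_obter_posicoes_adjacentes
  obtain ⟨hlen, hmem⟩ := hpre
  match p, hlen with
  | a :: b :: rest, _ =>
    simp only [List.getD, List.getElem?_cons_zero, List.getElem?_cons_succ, Option.getD_some] at hmem
    have h0 : PySem.List.pyGet? (a :: b :: rest) 0 = some a := by
      have hn : (0:Int) ≤ (rest.length : Int) + 1 := by omega
      simp [PySem.List.pyGet?, PySem.List.pyIdx?, hn]
    have h1 : PySem.List.pyGet? (a :: b :: rest) 1 = some b := by
      simp [PySem.List.pyGet?, PySem.List.pyIdx?]
    simp only [obter_posicoes_adjacentes, obter_posicoes_adjacentes_alt, h0, h1,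
      Option.bind_some, Option.map_some, Option.getD_some]
    exact pvCore_eq _ hmem
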